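-- pv_equiv track=rewrite | github.com/G4braG4br/SnpCourse | №9.py | connect_dicts
-- ===== SOURCE A (Python) =====
-- def connect_dicts(hash1, hash2):
--     first_sum = sum(hash1.values())
--     second_sum = sum(hash2.values())
--     out = list(filter(lambda x: x in hash1, hash2))
--     temp_dict1 = hash1.copy()
--     temp_dict2 = hash2.copy()
--     res = []
--     if out != []:
--         for key, val in hash1.items():
--             for k, v in hash2.items():
--                 if key == k:
--                     if first_sum > second_sum:
--                         res.append((key, val))
--                         temp_dict1.pop(key)
--                         temp_dict2.pop(k)
--                     elif first_sum < second_sum: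
--                         res.append((k, v))
--                         temp_dict2.pop(k)
--                         temp_dict1.pop(key)
--                     elif first_sum == second_sum:
--                         res.append((k, v))
--                         temp_dict2.pop(k)
--                         temp_dict1.pop(key)
--
--     temp_arr2 = list(temp_dict2.items())
--     temp_arr1 = list(temp_dict1.items())
--
--     rest = res + temp_arr1 + temp_arr2
--     r = list(filter(lambda x: x[1] >= 10, rest))
--     r.sort(key=lambda x: x[1])
--     return r
-- ===== SOURCE B (Python) =====
-- def connect_dicts(hash1, hash2):
--     winner = hash1 if sum(hash1.values()) > sum(hash2.values()) else hash2
--     commons = [(k, winner[k]) for k in hash1 if k in hash2]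
--     only1 = [(k, v) for k, v in hash1.items() if k not in hash2]
--     only2 = [(k, v) for k, v in hash2.items() if k not in hash1]
--     return sorted((p for p in commons + only1 + only2 if p[1] >= 10),
--                   key=lambda p: p[1])
-- ===== Notes on version B (the rewrite author's own statement) =====
-- stated objective: simpler
-- what changed: Replaces A's copies, guarded nested loop over both dicts and running pops by a direct three-way partition: pick the winning dict by value-sum once, build common / hash1-only / hash2-only pair lists with dict-membership tests, then filter and stable-sort.
import Mathlib
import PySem

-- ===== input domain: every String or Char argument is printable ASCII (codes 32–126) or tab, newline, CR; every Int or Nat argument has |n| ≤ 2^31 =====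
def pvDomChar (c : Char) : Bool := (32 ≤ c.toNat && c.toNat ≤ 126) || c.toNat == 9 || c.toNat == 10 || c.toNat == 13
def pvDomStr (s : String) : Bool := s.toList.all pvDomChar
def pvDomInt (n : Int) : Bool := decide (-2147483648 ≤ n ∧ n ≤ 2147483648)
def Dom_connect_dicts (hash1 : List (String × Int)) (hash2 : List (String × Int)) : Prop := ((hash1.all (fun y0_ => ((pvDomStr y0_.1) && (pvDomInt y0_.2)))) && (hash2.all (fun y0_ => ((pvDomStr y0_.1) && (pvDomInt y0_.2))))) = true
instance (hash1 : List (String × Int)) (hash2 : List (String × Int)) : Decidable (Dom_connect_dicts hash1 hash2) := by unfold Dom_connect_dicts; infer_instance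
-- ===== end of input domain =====

-- B replaces A's guarded nested loop with running pops by a direct three-way partition
-- (common keys from the winning dict, then hash1-only, then hash2-only pairs): simpler and shorter.

-- ===== PORT A =====
-- The Python arguments are dicts; both ports first build them from the association lists
-- exactly as Python's dict construction does (insertion order, later value overwrites).
-- Body of A's inner loop over hash2.items(); temp_dict.pop(key) always succeeds here
-- (key comes from the dict's own items), so its dict effect is Dict.erase.
def pvInnerA (firstSum secondSum : Int) (key : String) (val : Int)
    (st : List (String × Int) × PySem.Dict String Int × PySem.Dict String Int)
    (p : String × Int) :
    List (String × Int) × PySem.Dict String Int × PySem.Dict String Int :=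
  if key == p.1 then
    if firstSum > secondSum then
      (st.1 ++ [(key, val)], st.2.1.erase key, st.2.2.erase p.1)
    else if firstSum < secondSum then
      (st.1 ++ [(p.1, p.2)], st.2.1.erase key, st.2.2.erase p.1)
    else if firstSum == secondSum then
      (st.1 ++ [(p.1, p.2)], st.2.1.erase key, st.2.2.erase p.1)
    else st
  else st

def connect_dicts (hash1 : List (String × Int)) (hash2 : List (String × Int)) : List (String × Int) :=
  let h1 := PySem.Dict.ofList hash1
  let h2 := PySem.Dict.ofList hash2
  let firstSum := h1.values.sum
  let secondSum := h2.values.sum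
  let out := h2.keys.filter (fun x => h1.contains x)
  let st0 := (([] : List (String × Int)), h1, h2)
  let st :=
    if out ≠ [] then
      h1.items.foldl (fun st kv => h2.items.foldl (pvInnerA firstSum secondSum kv.1 kv.2) st) st0
    else st0
  let rest := st.1 ++ st.2.1.items ++ st.2.2.items
  let r := rest.filter (fun x => decide (x.2 ≥ 10))
  PySem.List.sorted r (fun x => x.2) false

-- ===== PORT B =====
-- winner[k] is looked up with getD 0; k is a common key, so it is always present in winner.
def connect_dicts_alt (hash1 : List (String × Int)) (hash2 : List (String × Int)) : List (String × Int) :=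
  let h1 := PySem.Dict.ofList hash1
  let h2 := PySem.Dict.ofList hash2
  let winner := if h1.values.sum > h2.values.sum then h1 else h2
  let commons := (h1.keys.filter (fun k => h2.contains k)).map (fun k => (k, winner.getD k 0))
  let only1 := h1.items.filter (fun p => !h2.contains p.1)
  let only2 := h2.items.filter (fun p => !h1.contains p.1)
  PySem.List.sorted ((commons ++ only1 ++ only2).filter (fun p => decide (p.2 ≥ 10)))
    (fun p => p.2) false

-- ===== PRECONDITION & SPEC =====
def Spec_connect_dicts (hash1 : List (String × Int)) (hash2 : List (String × Int)) (out : List (String × Int)) : Prop := out = connect_dicts_alt hash1 hash2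
instance (hash1 : List (String × Int)) (hash2 : List (String × Int)) (out : List (String × Int)) : Decidable (Spec_connect_dicts hash1 hash2 out) := by unfold Spec_connect_dicts; infer_instance

-- ===== CLAIM (what is proved, stated in full; the proofs are below) =====
def Claim_equal_connect_dicts : Prop := ∀ (hash1 : List (String × Int)) (hash2 : List (String × Int)), Dom_connect_dicts hash1 hash2 → Spec_connect_dicts hash1 hash2 (connect_dicts hash1 hash2)

-- ===== LEMMAS AND PROOFS =====

lemma pred_flip (key : String) :
    (fun p : String × Int => key == p.1) = (fun p : String × Int => p.1 == key) := by
  funext p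
  by_cases h : key = p.1 <;> simp [h, eq_comm]

lemma inner_fold_none (fs ss : Int) (key : String) (val : Int)
    (l2 : List (String × Int)) (h : ∀ p ∈ l2, (key == p.1) = false) st :
    l2.foldl (pvInnerA fs ss key val) st = st := by
  induction l2 generalizing st with
  | nil => rfl
  | cons q t ih =>
      have hq := h q (by simp)
      simp only [List.foldl_cons, pvInnerA, hq, Bool.false_eq_true, if_false]
      exact ih (fun p hp => h p (by simp [hp])) st

lemma inner_fold (fs ss : Int) (key : String) (val : Int)
    (l2 : List (String × Int)) (hnd : (l2.map Prod.fst).Nodup) st :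
    l2.foldl (pvInnerA fs ss key val) st =
      match l2.find? (fun p => key == p.1) with
      | none => st
      | some p => (st.1 ++ [if fs > ss then (key, val) else p],
                   st.2.1.erase key, st.2.2.erase p.1) := by
  induction l2 generalizing st with
  | nil => rfl
  | cons q t ih =>
      by_cases hq : (key == q.1) = true
      · have hkey : key = q.1 := by simpa using hq
        rw [List.map_cons] at hnd
        have hq1 : q.1 ∉ t.map Prod.fst := (List.nodup_cons.mp hnd).1
        have hnotin : ∀ p ∈ t, (key == p.1) = false := by
          intro p hp
          have hmem : p.1 ∈ t.map Prod.fst := List.mem_map_of_mem hp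
          have hne : key ≠ p.1 := by
            intro he; exact hq1 (by rwa [← he, hkey] at hmem)
          simp [hne]
        have hfind : (q :: t).find? (fun p => key == p.1) = some q := by
          simp [hq]
        rw [hfind]
        simp only [List.foldl_cons]
        rw [inner_fold_none fs ss key val t hnotin]
        simp only [pvInnerA, hq, if_true]
        rcases lt_trichotomy fs ss with h | h | h
        · have h1 : ¬ fs > ss := by omega
          have h2 : fs < ss := h
          simp [h1, h2, hkey]
        · simp [h, hkey]
        · simp [h, hkey]
      · have hq' : (key == q.1) = false := by simpa using hq
        have hstep : pvInnerA fs ss key val st q = st := by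
          simp [pvInnerA, hq']
        simp only [List.foldl_cons, hstep, List.find?_cons, hq']
        exact ih (by simpa using (List.nodup_cons.mp (by simpa using hnd)).2) st

lemma find?_to_get? (d2 : PySem.Dict String Int) (key : String) (p : String × Int)
    (h : d2.items.find? (fun q => key == q.1) = some p) :
    d2.get? key = some p.2 := by
  simp only [PySem.Dict.get?]
  rw [← pred_flip key, h]
  simp

lemma contains_of_find? (d2 : PySem.Dict String Int) (key : String) (p : String × Int)
    (h : d2.items.find? (fun q => key == q.1) = some p) :
    d2.contains key = true := by
  have hm := List.mem_of_find?_eq_some h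
  have hp : (key == p.1) = true := List.find?_some (p := fun q : String × Int => key == q.1) h
  have hkey : key = p.1 := by simpa using hp
  simp only [PySem.Dict.contains, List.any_eq_true]
  exact ⟨p, hm, by simp [hkey]⟩

lemma not_contains_of_find?_none (d2 : PySem.Dict String Int) (key : String)
    (h : d2.items.find? (fun q => key == q.1) = none) :
    d2.contains key = false := by
  rw [List.find?_eq_none] at h
  simp only [PySem.Dict.contains, List.any_eq_false]
  intro p hp
  by_cases hk : p.1 = key
  · exact absurd (by simp [hk]) (h p hp)
  · simp [hk]

lemma outer_fold (fs ss : Int) (d2 : PySem.Dict String Int)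
    (hnd2 : (d2.items.map Prod.fst).Nodup) (l1 : List (String × Int)) st :
    l1.foldl (fun st kv => d2.items.foldl (pvInnerA fs ss kv.1 kv.2) st) st =
      (st.1 ++ (l1.filter (fun kv => d2.contains kv.1)).map
          (fun kv => if fs > ss then kv else (kv.1, d2.getD kv.1 0)),
       (l1.filter (fun kv => d2.contains kv.1)).foldl (fun d kv => d.erase kv.1) st.2.1,
       (l1.filter (fun kv => d2.contains kv.1)).foldl (fun d kv => d.erase kv.1) st.2.2) := by
  induction l1 generalizing st with
  | nil => simp
  | cons kv t ih =>
      simp only [List.foldl_cons]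
      cases hfind : d2.items.find? (fun q => kv.1 == q.1) with
      | none =>
          have hc := not_contains_of_find?_none d2 kv.1 hfind
          rw [inner_fold fs ss kv.1 kv.2 d2.items hnd2 st, hfind, ih st]
          simp [hc]
      | some p =>
          have hc := contains_of_find? d2 kv.1 p hfind
          have hget := find?_to_get? d2 kv.1 p hfind
          have hp1 : p.1 = kv.1 := by
            have hp : (kv.1 == p.1) = true := List.find?_some (p := fun q : String × Int => kv.1 == q.1) hfind
            have : kv.1 = p.1 := by simpa using hp
            exact this.symm
          have hgd : d2.getD kv.1 0 = p.2 := by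
            simp [PySem.Dict.getD, hget]
          rw [inner_fold fs ss kv.1 kv.2 d2.items hnd2 st, hfind, ih]
          by_cases hgt : fs > ss
          · simp [hc, hgt, hp1, List.append_assoc]
          · simp only [List.filter_cons, hc, if_true, List.map_cons, List.foldl_cons,
              hgd, hp1, List.append_assoc]
            simp [hgt, ← hp1]

lemma erase_fold_items (l : List (String × Int)) (d : PySem.Dict String Int) :
    (l.foldl (fun d kv => d.erase kv.1) d).items =
      d.items.filter (fun p => l.all fun kv => !(p.1 == kv.1)) := by
  induction l generalizing d with
  | nil => simp
  | cons kv t ih =>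
      simp only [List.foldl_cons]
      rw [ih]
      simp only [PySem.Dict.erase, List.filter_filter]
      congr 1
      funext p
      simp [List.all_cons, Bool.and_comm]

lemma contains_true_iff (d : PySem.Dict String Int) (k : String) :
    d.contains k = true ↔ ∃ q ∈ d.items, q.1 = k := by
  simp [PySem.Dict.contains, List.any_eq_true]

lemma contains_of_mem_items (d : PySem.Dict String Int) (p : String × Int)
    (hp : p ∈ d.items) : d.contains p.1 = true :=
  (contains_true_iff d p.1).mpr ⟨p, hp, rfl⟩

lemma common_nil (d1 d2 : PySem.Dict String Int)
    (hout : d2.keys.filter (fun x => d1.contains x) = []) :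
    d1.items.filter (fun kv => d2.contains kv.1) = [] := by
  rw [List.filter_eq_nil_iff] at hout ⊢
  intro kv hkv hc
  rcases (contains_true_iff d2 kv.1).mp (by simpa using hc) with ⟨q, hq, hq1⟩
  have hk2 : kv.1 ∈ d2.keys := by
    simp only [PySem.Dict.keys, List.mem_map]
    exact ⟨q, hq, hq1⟩
  exact hout kv.1 hk2 (by simpa using contains_of_mem_items d1 kv hkv)

lemma all_common_1 (d1 d2 : PySem.Dict String Int) (p : String × Int) (hp : p ∈ d1.items) :
    (d1.items.filter (fun kv => d2.contains kv.1)).all (fun kv => !(p.1 == kv.1))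
      = !d2.contains p.1 := by
  cases hb : d2.contains p.1 with
  | true =>
      rw [List.all_eq_false.mpr ⟨p, List.mem_filter.mpr ⟨hp, hb⟩, by simp⟩]
      rfl
  | false =>
      simp only [Bool.not_false]
      rw [List.all_eq_true]
      intro kv hkv
      have hc2 := (List.mem_filter.mp hkv).2
      by_cases he : p.1 = kv.1
      · rw [he] at hb; rw [hb] at hc2; exact absurd hc2 (by simp)
      · simp [he]

lemma all_common_2 (d1 d2 : PySem.Dict String Int) (p : String × Int) (hp : p ∈ d2.items) :
    (d1.items.filter (fun kv => d2.contains kv.1)).all (fun kv => !(p.1 == kv.1))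
      = !d1.contains p.1 := by
  cases hb : d1.contains p.1 with
  | true =>
      rcases (contains_true_iff d1 p.1).mp hb with ⟨q, hq, hq1⟩
      have hq2 : d2.contains q.1 = true := by
        rw [hq1]; exact contains_of_mem_items d2 p hp
      rw [List.all_eq_false.mpr ⟨q, List.mem_filter.mpr ⟨hq, hq2⟩, by simp [hq1]⟩]
      rfl
  | false =>
      simp only [Bool.not_false]
      rw [List.all_eq_true]
      intro kv hkv
      have hc1 := (List.mem_filter.mp hkv).1
      by_cases he : p.1 = kv.1
      · exact absurd ((contains_true_iff d1 p.1).mpr ⟨kv, hc1, he.symm⟩) (by simp [hb])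
      · simp [he]

lemma keys_nodup_of_map_fst (d : PySem.Dict String Int)
    (h : (d.items.map Prod.fst).Nodup) : d.keys.Nodup := h

lemma main_eq (d1 d2 : PySem.Dict String Int)
    (hnd1 : (d1.items.map Prod.fst).Nodup) (hnd2 : (d2.items.map Prod.fst).Nodup) :
    (let firstSum := d1.values.sum
     let secondSum := d2.values.sum
     let out := d2.keys.filter (fun x => d1.contains x)
     let st0 := (([] : List (String × Int)), d1, d2)
     let st :=
       if out ≠ [] then
         d1.items.foldl (fun st kv => d2.items.foldl (pvInnerA firstSum secondSum kv.1 kv.2) st) st0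
       else st0
     let rest := st.1 ++ st.2.1.items ++ st.2.2.items
     PySem.List.sorted (rest.filter (fun x => decide (x.2 ≥ 10))) (fun x => x.2) false) =
    (let winner := if d1.values.sum > d2.values.sum then d1 else d2
     let commons := (d1.keys.filter (fun k => d2.contains k)).map (fun k => (k, winner.getD k 0))
     let only1 := d1.items.filter (fun p => !d2.contains p.1)
     let only2 := d2.items.filter (fun p => !d1.contains p.1)
     PySem.List.sorted ((commons ++ only1 ++ only2).filter (fun p => decide (p.2 ≥ 10)))
       (fun p => p.2) false) := by
  have hfold :
      (if d2.keys.filter (fun x => d1.contains x) ≠ [] then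
         d1.items.foldl
           (fun st kv => d2.items.foldl (pvInnerA d1.values.sum d2.values.sum kv.1 kv.2) st)
           (([] : List (String × Int)), d1, d2)
       else (([] : List (String × Int)), d1, d2)) =
      ((d1.items.filter (fun kv => d2.contains kv.1)).map
         (fun kv => if d1.values.sum > d2.values.sum then kv else (kv.1, d2.getD kv.1 0)),
       (d1.items.filter (fun kv => d2.contains kv.1)).foldl (fun d kv => d.erase kv.1) d1,
       (d1.items.filter (fun kv => d2.contains kv.1)).foldl (fun d kv => d.erase kv.1) d2) := by
    by_cases hout : d2.keys.filter (fun x => d1.contains x) ≠ []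
    · rw [if_pos hout,
        outer_fold d1.values.sum d2.values.sum d2 hnd2 d1.items (([], d1, d2))]
      simp
    · rw [if_neg hout]
      have hnil := common_nil d1 d2 (by simpa using hout)
      rw [hnil]
      simp
  show PySem.List.sorted _ _ false = PySem.List.sorted _ _ false
  rw [hfold]
  have hitems1 :
      ((d1.items.filter (fun kv => d2.contains kv.1)).foldl (fun d kv => d.erase kv.1) d1).items
        = d1.items.filter (fun p => !d2.contains p.1) := by
    rw [erase_fold_items]
    exact List.filter_congr (fun p hp => all_common_1 d1 d2 p hp)
  have hitems2 :
      ((d1.items.filter (fun kv => d2.contains kv.1)).foldl (fun d kv => d.erase kv.1) d2).items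
        = d2.items.filter (fun p => !d1.contains p.1) := by
    rw [erase_fold_items]
    exact List.filter_congr (fun p hp => all_common_2 d1 d2 p hp)
  have hcommons :
      (d1.items.filter (fun kv => d2.contains kv.1)).map
          (fun kv => if d1.values.sum > d2.values.sum then kv else (kv.1, d2.getD kv.1 0))
        = (d1.keys.filter (fun k => d2.contains k)).map
            (fun k => (k, (if d1.values.sum > d2.values.sum then d1 else d2).getD k 0)) := by
    have hkeys : d1.keys = d1.items.map (fun x => x.1) := rfl
    rw [hkeys, List.filter_map, List.map_map]
    refine List.map_congr_left ?_
    intro kv hkv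
    have hmem := (List.mem_filter.mp hkv).1
    by_cases hgt : d1.values.sum > d2.values.sum
    · rw [if_pos hgt]
      simp only [Function.comp, if_pos hgt]
      have : d1.getD kv.1 0 = kv.2 :=
        PySem.Dict.getD_of_mem_items d1 hmem (keys_nodup_of_map_fst d1 hnd1) 0
      rw [this]
    · rw [if_neg hgt]
      simp only [Function.comp, if_neg hgt]
  rw [hitems1, hitems2, hcommons]

-- ===== VERDICT (by name: the statement is the Claim_ definition above) =====
theorem connect_dicts_spec : Claim_equal_connect_dicts := by
  intro hash1 hash2 _hdom
  unfold Spec_connect_dicts connect_dicts connect_dicts_alt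
  have hnd1 : ((PySem.Dict.ofList hash1 : PySem.Dict String Int).items.map Prod.fst).Nodup := by
    simpa [PySem.Dict.keys] using PySem.Dict.nodup_keys_ofList (κ := String) (ν := Int) hash1
  have hnd2 : ((PySem.Dict.ofList hash2 : PySem.Dict String Int).items.map Prod.fst).Nodup := by
    simpa [PySem.Dict.keys] using PySem.Dict.nodup_keys_ofList (κ := String) (ν := Int) hash2
  exact main_eq _ _ hnd1 hnd2
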